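-- pv_equiv track=rewrite | github.com/praveensonare/Leetcode | python3/water_pocket.py | water_pockets
-- ===== SOURCE A (Python) =====
-- from typing import List
--
-- def water_pockets(landscape: List[int]) -> List[int]:
--     waterL = 0
--     waterR = 0
--
--     left = 0
--     right = len(landscape) - 1
--
--     max_left = landscape[left]
--     max_right = landscape[right]
--     insertPosL = 0
--     insertPosR = len(landscape)
--
--     trap = 0
--     result = [0]*len(landscape)
--     while left < right:
--
--         if landscape[left] < landscape[right]:
--             max_left = max(max_left, landscape[left])
--             trap = (max_left - landscape[left])
--
--             if (trap > 0) :
--                 waterL += trap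
--             else:
--                 if (waterL > 0):
--                     result[insertPosL] = waterL
--                     insertPosL = insertPosL + 1
--                 waterL = 0
--             left += 1
--         else:
--             max_right = max(max_right, landscape[right])
--             trap = (max_right - landscape[right])
--             if (trap > 0) :
--                 waterR += trap
--             else:
--                 if (waterR > 0):
--                     insertPosR = insertPosR - 1
--                     result[insertPosR] = waterR
--                 waterR = 0
--             right -= 1
--
--
--     if (waterL > 0):
--         result[insertPosL] = waterL
--         insertPosL = insertPosL + 1
--     if (waterR > 0):
--         insertPosR = insertPosR - 1
--         result[insertPosR] = waterR
--
--     return result[:insertPosL] + result[insertPosR:]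
-- ===== SOURCE B (Python) =====
-- from typing import List
--
-- def water_pockets(landscape: List[int]) -> List[int]:
--     pref = []
--     m = landscape[0]
--     for h in landscape:
--         m = max(m, h)
--         pref.append(m)
--     suf = []
--     m = landscape[-1]
--     for h in reversed(landscape):
--         m = max(m, h)
--         suf.append(m)
--     suf.reverse()
--     result = []
--     run = 0
--     for p, s, h in zip(pref, suf, landscape):
--         w = min(p, s) - h
--         if w > 0:
--             run += w
--         else:
--             if run > 0:
--                 result.append(run)
--             run = 0
--     if run > 0:
--         result.append(run)
--     return result
-- ===== Notes on version B (the rewrite author's own statement) =====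
-- stated objective: alternative
-- what changed: Replaces A's two-pointer sweep (which fills a preallocated array from both ends and splices it) by building prefix-max and suffix-max tables, forming per-index trapped water min(pref,suf)-h, and grouping maximal positive runs in one left-to-right scan.
import Mathlib
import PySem

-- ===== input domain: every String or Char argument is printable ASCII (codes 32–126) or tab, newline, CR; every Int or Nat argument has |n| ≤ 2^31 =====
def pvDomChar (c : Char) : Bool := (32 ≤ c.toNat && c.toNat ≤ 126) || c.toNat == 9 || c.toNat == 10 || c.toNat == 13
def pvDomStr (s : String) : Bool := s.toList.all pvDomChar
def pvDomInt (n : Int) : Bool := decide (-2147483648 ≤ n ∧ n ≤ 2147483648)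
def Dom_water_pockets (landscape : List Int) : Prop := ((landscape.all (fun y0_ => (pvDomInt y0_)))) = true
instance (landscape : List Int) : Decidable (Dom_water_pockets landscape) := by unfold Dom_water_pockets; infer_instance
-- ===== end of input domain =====

-- B replaces A's two-pointer both-ends sweep by prefix/suffix max tables plus one
-- left-to-right positive-run grouping scan (objective: alternative, same O(n) cost).

-- ===== PORT A =====
-- post-loop code of A: the two final flushes and `result[:insertPosL] + result[insertPosR:]`
-- (the slice indices are provably in [0, len] here, so take/drop is exact)
def aFlush (res : List Int) (wL wR : Int) (iL iR : Nat) : List Int :=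
  let p1 : List Int × Nat := if 0 < wL then (res.set iL wL, iL + 1) else (res, iL)
  let p2 : List Int × Nat := if 0 < wR then (p1.1.set (iR - 1) wR, iR - 1) else (p1.1, iR)
  p2.1.take p1.2 ++ p2.1.drop p2.2

-- the `while left < right` loop, same state, same branch order (indices stay in range
-- while the loop runs, so `getD … 0` is exact)
def aLoop (l : List Int) (left right : Nat) (ml mr wL wR : Int) (res : List Int)
    (iL iR : Nat) : List Int × Int × Int × Nat × Nat :=
  if h : left < right then
    if l.getD left 0 < l.getD right 0 then
      let ml' := max ml (l.getD left 0)
      let trap := ml' - l.getD left 0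
      if 0 < trap then aLoop l (left + 1) right ml' mr (wL + trap) wR res iL iR
      else if 0 < wL then aLoop l (left + 1) right ml' mr 0 wR (res.set iL wL) (iL + 1) iR
      else aLoop l (left + 1) right ml' mr 0 wR res iL iR
    else
      let mr' := max mr (l.getD right 0)
      let trap := mr' - l.getD right 0
      if 0 < trap then aLoop l left (right - 1) ml mr' wL (wR + trap) res iL iR
      else if 0 < wR then aLoop l left (right - 1) ml mr' wL 0 (res.set (iR - 1) wR) iL (iR - 1)
      else aLoop l left (right - 1) ml mr' wL 0 res iL iR
  else (res, wL, wR, iL, iR)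
termination_by right - left
decreasing_by all_goals omega

def water_pockets (landscape : List Int) : List Int :=
  let n := landscape.length
  match aLoop landscape 0 (n - 1) (landscape.getD 0 0) (landscape.getD (n - 1) 0) 0 0
      (List.replicate n 0) 0 n with
  | (res, wL, wR, iL, iR) => aFlush res wL wR iL iR

-- ===== PORT B =====
-- running-max scan: pref[i] = max(m0, landscape[0..i])
def bPrefMax (xs : List Int) (m : Int) : List Int :=
  match xs with
  | [] => []
  | h :: t => let m' := max m h; m' :: bPrefMax t m'

-- the zip loop of B: w = min(p, s) - h; sum maximal positive runs, append on closing
def bRuns (z : List ((Int × Int) × Int)) (run : Int) (acc : List Int) : List Int :=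
  match z with
  | [] => if 0 < run then acc ++ [run] else acc
  | e :: t =>
    let w := min e.1.1 e.1.2 - e.2
    if 0 < w then bRuns t (run + w) acc
    else if 0 < run then bRuns t 0 (acc ++ [run])
    else bRuns t 0 acc

def water_pockets_alt (landscape : List Int) : List Int :=
  let pref := bPrefMax landscape (landscape.getD 0 0)
  let suf := (bPrefMax landscape.reverse (landscape.getD (landscape.length - 1) 0)).reverse
  bRuns ((pref.zip suf).zip landscape) 0 []

-- ===== PRECONDITION & SPEC =====
-- A raises IndexError on the empty list (landscape[0]); B raises there too.
def Pre_water_pockets (landscape : List Int) : Prop := landscape ≠ []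
instance (landscape : List Int) : Decidable (Pre_water_pockets landscape) := by
  unfold Pre_water_pockets; infer_instance
def pvWitness_water_pockets : List Int := [2, 0, 1, 0, 3]

def Spec_water_pockets (landscape : List Int) (out : List Int) : Prop := out = water_pockets_alt landscape
instance (landscape : List Int) (out : List Int) : Decidable (Spec_water_pockets landscape out) := by unfold Spec_water_pockets; infer_instance

-- ===== CLAIM (what is proved, stated in full; the proofs are below) =====
def Claim_equal_water_pockets : Prop := ∀ (landscape : List Int), Dom_water_pockets landscape → Pre_water_pockets landscape → Spec_water_pockets landscape (water_pockets landscape)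

-- ===== LEMMAS AND PROOFS =====

-- proof-side characterization: runs of the water list with an open left accumulator a
-- and a pending right accumulator b merged into the final run
def glue (a : Int) (ws : List Int) (b : Int) : List Int :=
  match ws with
  | [] => if 0 < a + b then [a + b] else []
  | w :: t => if 0 < w then glue (a + w) t b
              else (if 0 < a then [a] else []) ++ glue 0 t b

def pf (l : List Int) (i : Nat) : Int := (l.take (i + 1)).foldl max (l.getD 0 0)
def sf (l : List Int) (i : Nat) : Int := (l.drop i).foldl max (l.getD (l.length - 1) 0)
def wat (l : List Int) : List Int :=
  (((bPrefMax l (l.getD 0 0)).zip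
     ((bPrefMax l.reverse (l.getD (l.length - 1) 0)).reverse)).zip l).map
    (fun e => min e.1.1 e.1.2 - e.2)

-- foldl max toolbox
lemma fm_swap (xs : List Int) : ∀ a b : Int, xs.foldl max (max a b) = max (xs.foldl max a) b := by
  induction xs with
  | nil => intro a b; rfl
  | cons x t ih =>
    intro a b
    simp only [List.foldl_cons]
    rw [show max (max a b) x = max (max a x) b by rw [max_right_comm], ih]

lemma fm_reverse (xs : List Int) (a : Int) : xs.reverse.foldl max a = xs.foldl max a := by
  induction xs generalizing a with
  | nil => rfl
  | cons x t ih =>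
    simp only [List.reverse_cons, List.foldl_append, List.foldl_cons, List.foldl_nil,
      List.foldl_cons]
    rw [ih, fm_swap]

lemma fm_init_mono {a b : Int} (xs : List Int) (h : a ≤ b) : xs.foldl max a ≤ xs.foldl max b := by
  induction xs generalizing a b with
  | nil => exact h
  | cons x t ih => exact ih (max_le_max_right x h)

lemma fm_le_init (a : Int) (xs : List Int) : a ≤ xs.foldl max a := by
  induction xs generalizing a with
  | nil => exact le_refl a
  | cons x t ih => exact le_trans (le_max_left a x) (ih (max a x))

lemma fm_mem_le {x : Int} {xs : List Int} (a : Int) (h : x ∈ xs) : x ≤ xs.foldl max a := by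
  induction xs generalizing a with
  | nil => cases h
  | cons y t ih =>
    rcases List.mem_cons.1 h with h | h
    · subst h; exact le_trans (le_max_right a x) (fm_le_init _ t)
    · exact ih (max a y) h

lemma bPrefMax_length (xs : List Int) (m : Int) : (bPrefMax xs m).length = xs.length := by
  induction xs generalizing m with
  | nil => rfl
  | cons x t ih => simp [bPrefMax, ih]

lemma bPrefMax_getElem (xs : List Int) (m : Int) (i : Nat) (h : i < xs.length)
    (h' : i < (bPrefMax xs m).length) :
    (bPrefMax xs m)[i] = (xs.take (i + 1)).foldl max m := by
  induction xs generalizing m i with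
  | nil => simp at h
  | cons x t ih =>
    cases i with
    | zero => simp [bPrefMax]
    | succ j =>
      simp only [bPrefMax, List.getElem_cons_succ, List.take_succ_cons, List.foldl_cons]
      exact ih (max m x) j (by simpa using h) (by simp [bPrefMax_length] at h' ⊢; omega)

lemma wat_length (l : List Int) : (wat l).length = l.length := by
  simp [wat, bPrefMax_length]

lemma wat_getElem (l : List Int) (i : Nat) (h : i < l.length) (h' : i < (wat l).length) :
    (wat l)[i] = min (pf l i) (sf l i) - l[i] := by
  have hp : i < (bPrefMax l (l.getD 0 0)).length := by rw [bPrefMax_length]; exact h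
  have hs : i < ((bPrefMax l.reverse (l.getD (l.length - 1) 0)).reverse).length := by
    simp [bPrefMax_length]; exact h
  simp only [wat, List.getElem_map, List.getElem_zip]
  congr 1
  congr 1
  · exact bPrefMax_getElem _ _ _ h hp
  · -- suffix side
    rw [List.getElem_reverse]
    rw [bPrefMax_getElem _ _ _ (by simp [bPrefMax_length] at hs ⊢; omega)
        (by simp [bPrefMax_length] at hs ⊢; omega)]
    have hlen : (bPrefMax l.reverse (l.getD (l.length - 1) 0)).length = l.length := by
      simp [bPrefMax_length]
    rw [hlen]
    have h1 : l.length - 1 - i + 1 = l.length - i := by omega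
    rw [h1]
    have h2 : l.reverse.take (l.length - i) = (l.drop i).reverse := by
      rw [← List.reverse_drop]
    rw [h2, fm_reverse]
    rfl

-- height is below its own prefix and suffix maxes
lemma le_pf (l : List Int) (i : Nat) (h : i < l.length) : l[i] ≤ pf l i := by
  apply fm_mem_le
  have hi : i < (l.take (i + 1)).length := by simp; omega
  have := List.getElem_take (xs := l) (j := i + 1) (i := i) (h := hi)
  rw [← this]; exact List.getElem_mem hi

lemma le_sf (l : List Int) (i : Nat) (h : i < l.length) : l[i] ≤ sf l i := by
  apply fm_mem_le
  have hi : 0 < (l.drop i).length := by simp; omega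
  have := List.getElem_drop (xs := l) (i := i) (j := 0) (h := hi)
  simp only [Nat.add_zero] at this
  rw [← this]; exact List.getElem_mem hi

-- glue structural lemmas for processing the last element
lemma glue_append_pos (a b w : Int) (hw : 0 < w) (ws : List Int) :
    glue a (ws ++ [w]) b = glue a ws (w + b) := by
  induction ws generalizing a with
  | nil => simp [glue, hw, add_assoc]
  | cons v t ih =>
    by_cases hv : 0 < v
    · simp [glue, hv, ih]
    · simp [glue, hv, ih]

lemma glue_append_zero (a b : Int) (ws : List Int) :
    glue a (ws ++ [0]) b = glue a ws 0 ++ (if 0 < b then [b] else []) := by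
  induction ws generalizing a with
  | nil => simp [glue]
  | cons v t ih =>
    by_cases hv : 0 < v
    · simp [glue, hv, ih]
    · simp [glue, hv, ih]

lemma bRuns_eq_glue (z : List ((Int × Int) × Int)) : ∀ (run : Int) (acc : List Int),
    bRuns z run acc = acc ++ glue run (z.map (fun e => min e.1.1 e.1.2 - e.2)) 0 := by
  induction z with
  | nil => intro run acc; simp only [bRuns, List.map_nil, glue, add_zero]; split_ifs <;> simp
  | cons e t ih =>
    intro run acc
    simp only [bRuns, List.map_cons, glue]
    by_cases hw : 0 < min e.1.1 e.1.2 - e.2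
    · rw [if_pos hw, if_pos hw, ih]
    · rw [if_neg hw, if_neg hw]
      by_cases hr : 0 < run
      · rw [if_pos hr, if_pos hr, ih]; simp
      · rw [if_neg hr, if_neg hr, ih]; simp

lemma alt_eq_glue (l : List Int) : water_pockets_alt l = glue 0 (wat l) 0 := by
  rw [water_pockets_alt, bRuns_eq_glue]
  simp [wat]

-- list-set bookkeeping
lemma set_take_succ (res : List Int) (i : Nat) (x : Int) (h : i < res.length) :
    (res.set i x).take (i + 1) = res.take i ++ [x] := by
  rw [List.take_succ_eq_append_getElem (by simpa using h), List.take_set_of_le (le_refl i)]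
  congr 1
  rw [List.getElem_set_self (by simpa using h)]

lemma set_drop_self (res : List Int) (i : Nat) (x : Int) (h : i < res.length) :
    (res.set i x).drop i = x :: res.drop (i + 1) := by
  rw [List.drop_eq_getElem_cons (by simpa using h)]
  rw [List.getElem_set_self (by simpa using h), List.drop_set_of_lt (by omega)]


-- step lemmas for the running maxima
lemma take_foldl_succ (l : List Int) (i : Nat) (m : Int) (h : i < l.length) :
    (l.take (i + 1)).foldl max m = max ((l.take i).foldl max m) l[i] := by
  rw [List.take_succ_eq_append_getElem h, List.foldl_append]; simp

lemma drop_foldl_pred (l : List Int) (i : Nat) (m : Int) (h : i < l.length) :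
    (l.drop i).foldl max m = max ((l.drop (i + 1)).foldl max m) l[i] := by
  rw [List.drop_eq_getElem_cons h]
  simp only [List.foldl_cons]
  exact fm_swap _ _ _

lemma pf_step (l : List Int) (i : Nat) (h : i < l.length) :
    pf l i = max ((l.take i).foldl max (l.getD 0 0)) l[i] := take_foldl_succ l i _ h

lemma sf_step (l : List Int) (i : Nat) (h : i < l.length) :
    sf l i = max ((l.drop (i + 1)).foldl max (l.getD (l.length - 1) 0)) l[i] :=
  drop_foldl_pred l i _ h

lemma getElem_le_pf (l : List Int) (j i : Nat) (hj : j ≤ i) (hi : i < l.length) :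
    l[j]'(by omega) ≤ pf l i := by
  apply fm_mem_le
  have hjt : j < (l.take (i + 1)).length := by simp; omega
  have := List.getElem_take (xs := l) (j := i + 1) (i := j) (h := hjt)
  rw [← this]; exact List.getElem_mem hjt

lemma getElem_le_sf (l : List Int) (i j : Nat) (hij : i ≤ j) (hj : j < l.length) :
    l[j] ≤ sf l i := by
  apply fm_mem_le
  have hjd : j - i < (l.drop i).length := by simp; omega
  have h2 : (l.drop i)[j - i] = l[j] := by
    rw [List.getElem_drop (xs := l) (i := i) (j := j - i) (h := hjd)]
    congr 1; omega
  rw [← h2]; exact List.getElem_mem hjd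

lemma mr_le_sf (l : List Int) (left right : Nat) (h : left ≤ right + 1) :
    (l.drop (right + 1)).foldl max (l.getD (l.length - 1) 0) ≤ sf l left := by
  have e2 : (l.drop left).drop (right + 1 - left) = l.drop (right + 1) := by
    rw [List.drop_drop]; congr 1; omega
  have e1 : (l.drop left).take (right + 1 - left) ++ l.drop (right + 1) = l.drop left := by
    rw [← e2]; exact List.take_append_drop _ _
  rw [sf, ← e1, List.foldl_append]
  exact fm_init_mono _ (fm_le_init _ _)

lemma ml_le_pf (l : List Int) (left right : Nat) (h : left ≤ right + 1) :
    (l.take left).foldl max (l.getD 0 0) ≤ pf l right := by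
  have e1 : l.take (right + 1) = l.take left ++ (l.drop left).take (right + 1 - left) := by
    have := List.take_add (l := l) (i := left) (j := right + 1 - left)
    rw [show left + (right + 1 - left) = right + 1 by omega] at this
    exact this
  rw [pf, e1, List.foldl_append]
  exact fm_le_init _ _

-- ===== the master invariant lemma =====
lemma aLoop_glue (l : List Int) : ∀ (k left right : Nat) (ml mr wL wR : Int)
    (res cL cR : List Int) (iL iR : Nat),
    k = right - left → left ≤ right → right < l.length →
    ml = (l.take left).foldl max (l.getD 0 0) →
    mr = (l.drop (right + 1)).foldl max (l.getD (l.length - 1) 0) →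
    (left = 0 ∨ ml < max mr (l.getD right 0)) →
    (right = l.length - 1 ∨ mr ≤ max ml (l.getD left 0)) →
    res.length = l.length →
    res.take iL = cL → res.drop iR = cR.reverse → iR ≤ l.length →
    2 * iL + (if 0 < wL then 1 else 0) ≤ left →
    2 * (l.length - iR) + (if 0 < wR then 1 else 0) + right + 1 ≤ l.length →
    (match aLoop l left right ml mr wL wR res iL iR with
     | (res', wL', wR', iL', iR') => aFlush res' wL' wR' iL' iR')
      = cL ++ glue wL (((wat l).drop left).take (right + 1 - left)) wR ++ cR.reverse := by
  intro k
  induction k using Nat.strong_induction_on with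
  | _ k IH =>
  intro left right ml mr wL wR res cL cR iL iR hk hlr hrn hml hmr hI3 hI4 hres htake hdrop
    hiRn hJL hJR
  have hn : 0 < l.length := by omega
  have hwlen : (wat l).length = l.length := wat_length l
  have hJL0 : 2 * iL ≤ left := by split_ifs at hJL <;> omega
  have hJR0 : 2 * (l.length - iR) + right + 1 ≤ l.length := by split_ifs at hJR <;> omega
  have hgl : l.getD left 0 = l[left]'(by omega) := List.getD_eq_getElem l 0 (by omega)
  have hgr : l.getD right 0 = l[right] := List.getD_eq_getElem l 0 hrn
  by_cases h : left < right
  · -- one loop iteration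
    rw [aLoop, dif_pos h]
    by_cases hc : l.getD left 0 < l.getD right 0
    · -- LEFT STEP
      rw [if_pos hc]
      dsimp only
      have hcc : l[left] < l[right] := by rw [hgl, hgr] at hc; exact hc
      have hmlsf : ml ≤ sf l left := by
        rcases hI3 with h0 | h3
        · have hml0 : ml = l[left] := by
            rw [hml, show l.take left = [] from by rw [h0]; exact List.take_zero,
              List.foldl_nil, show l.getD 0 0 = l.getD left 0 from by rw [h0], hgl]
          rw [hml0]; exact getElem_le_sf l left left (le_refl _) (by omega)
        · refine le_of_lt (lt_of_lt_of_le h3 (max_le ?_ ?_))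
          · rw [hmr]; exact mr_le_sf l left right (by omega)
          · rw [hgr]; exact getElem_le_sf l left right (by omega) hrn
      have hpfsf : pf l left ≤ sf l left := by
        rw [pf_step l left (by omega), ← hml]
        exact max_le hmlsf
          (le_trans (le_of_lt hcc) (getElem_le_sf l left right (by omega) hrn))
      have hW : (wat l)[left]'(by omega) = max ml (l.getD left 0) - l.getD left 0 := by
        rw [wat_getElem l left (by omega) (by omega), min_eq_left hpfsf,
          pf_step l left (by omega), hml, hgl]
      have hseg : ((wat l).drop left).take (right + 1 - left)
          = (wat l)[left]'(by omega) :: ((wat l).drop (left + 1)).take (right + 1 - (left + 1)) := by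
        rw [List.drop_eq_getElem_cons (by omega),
          show right + 1 - left = (right + 1 - (left + 1)) + 1 by omega, List.take_succ_cons]
      have hml' : max ml (l.getD left 0) = (l.take (left + 1)).foldl max (l.getD 0 0) := by
        rw [take_foldl_succ l left _ (by omega), hml, hgl]
      have hI3' : left + 1 = 0 ∨ max ml (l.getD left 0) < max mr (l.getD right 0) := by
        refine Or.inr (max_lt ?_ ?_)
        · rcases hI3 with h0 | h3
          · have hml0 : ml = l.getD left 0 := by
              rw [hml, show l.take left = [] from by rw [h0]; exact List.take_zero,
                List.foldl_nil, show l.getD 0 0 = l.getD left 0 from by rw [h0]]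
            rw [hml0, hgl, hgr]; exact lt_of_lt_of_le hcc (le_max_right _ _)
          · exact h3
        · rw [hgl, hgr]; exact lt_of_lt_of_le hcc (le_max_right _ _)
      have hI4' : right = l.length - 1 ∨ mr ≤ max (max ml (l.getD left 0)) (l.getD (left + 1) 0) := by
        rcases hI4 with h4 | h4
        · exact Or.inl h4
        · exact Or.inr (le_trans h4 (le_max_left _ _))
      rw [hseg]
      by_cases ht : 0 < max ml (l.getD left 0) - l.getD left 0
      · rw [if_pos ht]
        have hrec := IH (right - (left + 1)) (by omega) (left + 1) right
          (max ml (l.getD left 0)) mr (wL + (max ml (l.getD left 0) - l.getD left 0)) wR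
          res cL cR iL iR rfl (by omega) hrn hml' hmr hI3' hI4' hres htake hdrop hiRn
          (by split_ifs at hJL ⊢ <;> omega) hJR
        dsimp only at hrec; rw [hrec, glue, if_pos (hW ▸ ht), hW]
      · rw [if_neg ht]
        have hWz : ¬ 0 < (wat l)[left]'(by omega) := by rw [hW]; exact ht
        by_cases hwl : 0 < wL
        · rw [if_pos hwl]
          have hJL1 : 2 * iL + 1 ≤ left := by rw [if_pos hwl] at hJL; exact hJL
          have hiLlen : iL < res.length := by rw [hres]; omega
          have hiLiR : iL < iR := by omega
          have hrec := IH (right - (left + 1)) (by omega) (left + 1) right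
            (max ml (l.getD left 0)) mr 0 wR (res.set iL wL) (cL ++ [wL]) cR (iL + 1) iR
            rfl (by omega) hrn hml' hmr hI3' hI4' (by rw [List.length_set]; exact hres)
            (by rw [set_take_succ res iL wL hiLlen, htake])
            (by rw [List.drop_set_of_lt hiLiR, hdrop]) hiRn
            (by split_ifs <;> omega) hJR
          dsimp only at hrec; rw [hrec, glue, if_neg hWz, if_pos hwl]
          simp [List.append_assoc]
        · rw [if_neg hwl]
          have hrec := IH (right - (left + 1)) (by omega) (left + 1) right
            (max ml (l.getD left 0)) mr 0 wR res cL cR iL iR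
            rfl (by omega) hrn hml' hmr hI3' hI4' hres htake hdrop hiRn
            (by split_ifs <;> omega) hJR
          dsimp only at hrec; rw [hrec, glue, if_neg hWz, if_neg hwl]
          simp
    · -- RIGHT STEP
      rw [if_neg hc]
      dsimp only
      have hcc : l[right] ≤ l[left] := by rw [hgl, hgr] at hc; omega
      have hmrpf : mr ≤ pf l right := by
        rcases hI4 with h4 | h4
        · have hmr0 : mr = l[right] := by
            rw [hmr, show right + 1 = l.length by omega, List.drop_length, List.foldl_nil,
              (show l.getD (l.length - 1) 0 = l.getD right 0 from by
                rw [show l.length - 1 = right by omega]), hgr]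
          rw [hmr0]; exact getElem_le_pf l right right (le_refl _) hrn
        · refine le_trans h4 (max_le ?_ ?_)
          · rw [hml]; exact ml_le_pf l left right (by omega)
          · rw [hgl]; exact getElem_le_pf l left right (by omega) hrn
      have hsfpf : sf l right ≤ pf l right := by
        rw [sf_step l right hrn, ← hmr]
        exact max_le hmrpf (getElem_le_pf l right right (le_refl _) hrn)
      have hW : (wat l)[right]'(by omega) = max mr (l.getD right 0) - l.getD right 0 := by
        rw [wat_getElem l right hrn (by omega), min_eq_right hsfpf,
          sf_step l right hrn, hmr, hgr]
      have hseg : ((wat l).drop left).take (right + 1 - left)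
          = ((wat l).drop left).take (right - 1 + 1 - left) ++ [(wat l)[right]'(by omega)] := by
        have hlen : right - left < ((wat l).drop left).length := by
          rw [List.length_drop, hwlen]; omega
        rw [show right + 1 - left = (right - left) + 1 by omega,
          List.take_succ_eq_append_getElem hlen, show right - 1 + 1 - left = right - left by omega]
        congr 2
        rw [List.getElem_drop (h := hlen)]
        congr 1; omega
      have hmr' : max mr (l.getD right 0) = (l.drop (right - 1 + 1)).foldl max
          (l.getD (l.length - 1) 0) := by
        rw [show right - 1 + 1 = right by omega, drop_foldl_pred l right _ hrn, hmr, hgr]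
      have hI3' : left = 0 ∨ ml < max (max mr (l.getD right 0)) (l.getD (right - 1) 0) := by
        rcases hI3 with h0 | h3
        · exact Or.inl h0
        · exact Or.inr (lt_of_lt_of_le h3 (le_max_left _ _))
      have hI4' : right - 1 = l.length - 1 ∨ max mr (l.getD right 0) ≤ max ml (l.getD left 0) := by
        refine Or.inr (max_le ?_ ?_)
        · rcases hI4 with h4 | h4
          · have hmr0 : mr = l[right] := by
              rw [hmr, show right + 1 = l.length by omega, List.drop_length, List.foldl_nil,
                (show l.getD (l.length - 1) 0 = l.getD right 0 from by
                  rw [show l.length - 1 = right by omega]), hgr]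
            rw [hmr0, hgl]; exact le_trans hcc (le_max_right _ _)
          · exact h4
        · rw [hgl, hgr]; exact le_trans hcc (le_max_right _ _)
      rw [hseg]
      by_cases ht : 0 < max mr (l.getD right 0) - l.getD right 0
      · rw [if_pos ht]
        have hrec := IH (right - 1 - left) (by omega) left (right - 1)
          ml (max mr (l.getD right 0)) wL (wR + (max mr (l.getD right 0) - l.getD right 0))
          res cL cR iL iR rfl (by omega) (by omega) hml hmr' hI3' hI4' hres htake hdrop hiRn
          hJL (by split_ifs at hJR ⊢ <;> omega)
        dsimp only at hrec; rw [hrec, glue_append_pos _ _ _ (hW ▸ ht), hW,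
          add_comm (max mr (l.getD right 0) - l.getD right 0) wR]
      · rw [if_neg ht]
        have htz : max mr (l.getD right 0) - l.getD right 0 = 0 := by
          have := le_max_right mr (l.getD right 0); omega
        have hWz : (wat l)[right]'(by omega) = 0 := by rw [hW, htz]
        rw [hWz, glue_append_zero]
        by_cases hwr : 0 < wR
        · rw [if_pos hwr, if_pos hwr]
          have hJR1 : 2 * (l.length - iR) + 1 + right + 1 ≤ l.length := by
            rw [if_pos hwr] at hJR; omega
          have hiR1 : iR - 1 < res.length := by rw [hres]; omega
          have hrec := IH (right - 1 - left) (by omega) left (right - 1)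
            ml (max mr (l.getD right 0)) wL 0 (res.set (iR - 1) wR) cL (cR ++ [wR]) iL (iR - 1)
            rfl (by omega) (by omega) hml hmr' hI3' hI4'
            (by rw [List.length_set]; exact hres)
            (by rw [List.take_set_of_le (by omega : iL ≤ iR - 1), htake])
            (by rw [set_drop_self res (iR - 1) wR hiR1, show iR - 1 + 1 = iR by omega, hdrop]
                simp) (by omega)
            hJL (by split_ifs <;> omega)
          dsimp only at hrec; rw [hrec]
          simp [List.append_assoc]
        · rw [if_neg hwr, if_neg hwr]
          have hrec := IH (right - 1 - left) (by omega) left (right - 1)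
            ml (max mr (l.getD right 0)) wL 0 res cL cR iL iR
            rfl (by omega) (by omega) hml hmr' hI3' hI4' hres htake hdrop hiRn
            hJL (by split_ifs <;> omega)
          dsimp only at hrec; rw [hrec]
          simp
  · -- MEETING: left = right, flush and splice
    have hm : left = right := by omega
    subst hm
    rw [aLoop, dif_neg h]
    dsimp only
    have hsegm : ((wat l).drop left).take (left + 1 - left) = [(wat l)[left]'(by omega)] := by
      rw [show left + 1 - left = 1 by omega, List.drop_eq_getElem_cons (by omega),
        show (1 : Nat) = 0 + 1 from rfl, List.take_succ_cons, List.take_zero]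
    have h5 : ml ≤ l.getD left 0 ∨ mr ≤ l.getD left 0 := by
      rcases hI3 with h0 | h3
      · left
        rw [hml, show l.take left = [] from by rw [h0]; exact List.take_zero,
          List.foldl_nil, show l.getD 0 0 = l.getD left 0 from by rw [h0]]
      · rcases hI4 with h4 | h4
        · right
          rw [hmr, show left + 1 = l.length by omega, List.drop_length, List.foldl_nil,
            (show l.getD (l.length - 1) 0 = l.getD left 0 from by
              rw [show l.length - 1 = left by omega])]
        · have ha := lt_max_iff.mp h3
          have hb := le_max_iff.mp h4
          omega
    have hWm : (wat l)[left]'(by omega) = 0 := by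
      rw [wat_getElem l left (by omega) (by omega)]
      have h1 : pf l left = max ml (l.getD left 0) := by
        rw [pf_step l left (by omega), hml, hgl]
      have h2 : sf l left = max mr (l.getD left 0) := by
        rw [sf_step l left (by omega), hmr, hgl]
      have h3 := le_pf l left (by omega)
      have h4 := le_sf l left (by omega)
      rw [hgl] at h5
      rcases h5 with h5 | h5
      · have h1' : pf l left = l[left] := by rw [h1, hgl]; exact max_eq_right h5
        rw [min_eq_left (by rw [h1']; exact h4), h1']; omega
      · have h2' : sf l left = l[left] := by rw [h2, hgl]; exact max_eq_right h5
        rw [min_eq_right (by rw [h2']; exact h3), h2']; omega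
    rw [hsegm, hWm]
    have hglue : glue wL [0] wR
        = (if 0 < wL then [wL] else []) ++ (if 0 < wR then [wR] else []) := by
      simp [glue]
    rw [hglue, aFlush]
    by_cases hwl : 0 < wL
    · have hJL1 : 2 * iL + 1 ≤ left := by rw [if_pos hwl] at hJL; exact hJL
      have hiLlen : iL < res.length := by rw [hres]; omega
      rw [if_pos hwl]
      by_cases hwr : 0 < wR
      · have hJR1 : 2 * (l.length - iR) + 1 + left + 1 ≤ l.length := by
          rw [if_pos hwr] at hJR; omega
        rw [if_pos hwr]
        dsimp only
        have hiR1 : iR - 1 < (res.set iL wL).length := by rw [List.length_set, hres]; omega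
        rw [List.take_set_of_le (by omega : iL + 1 ≤ iR - 1),
          set_take_succ res iL wL hiLlen, htake,
          set_drop_self (res.set iL wL) (iR - 1) wR hiR1, show iR - 1 + 1 = iR by omega,
          List.drop_set_of_lt (by omega : iL < iR), hdrop]
        simp [hwl, hwr, List.append_assoc]
      · rw [if_neg hwr]
        dsimp only
        rw [set_take_succ res iL wL hiLlen, htake,
          List.drop_set_of_lt (by omega : iL < iR), hdrop]
        simp [hwl, hwr, List.append_assoc]
    · rw [if_neg hwl]
      by_cases hwr : 0 < wR
      · have hJR1 : 2 * (l.length - iR) + 1 + left + 1 ≤ l.length := by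
          rw [if_pos hwr] at hJR; omega
        rw [if_pos hwr]
        dsimp only
        have hiR1 : iR - 1 < res.length := by rw [hres]; omega
        rw [List.take_set_of_le (by omega : iL ≤ iR - 1), htake,
          set_drop_self res (iR - 1) wR hiR1, show iR - 1 + 1 = iR by omega, hdrop]
        simp [hwl, hwr, List.append_assoc]
      · rw [if_neg hwr]
        dsimp only
        rw [htake, hdrop]
        simp [hwl, hwr]

theorem water_pockets_spec : Claim_equal_water_pockets := by
  intro l _ hpre
  have hn : 0 < l.length := List.length_pos_iff.mpr hpre
  show water_pockets l = water_pockets_alt l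
  rw [alt_eq_glue]
  have hmain := aLoop_glue l (l.length - 1) 0 (l.length - 1) (l.getD 0 0)
      (l.getD (l.length - 1) 0) 0 0 (List.replicate l.length 0) [] [] 0 l.length
      (by omega) (by omega) (by omega)
      (by simp)
      (by rw [show l.length - 1 + 1 = l.length by omega, List.drop_length, List.foldl_nil])
      (Or.inl rfl) (Or.inl rfl)
      (by simp)
      (by simp)
      (by simp)
      (le_refl _)
      (by simp)
      (by simp; omega)
  dsimp only at hmain
  rw [water_pockets]
  dsimp only
  rw [hmain, List.drop_zero, show l.length - 1 + 1 - 0 = l.length by omega,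
    show List.take l.length (wat l) = wat l from by rw [← wat_length l]; exact List.take_length]
  simp
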